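-- pv_equiv track=rewrite | github.com/invoke-ai/InvokeAI | invokeai/backend/patches/lora_conversions/flux_onetrainer_bfl_lora_conversion_utils.py | is_state_dict_likely_in_flux_onetrainer_bfl_format
-- ===== SOURCE A (Python) =====
-- from typing import Any, Dict
--
-- _TRANSFORMER_PREFIX = "transformer."
--
-- _LORA_SUFFIXES = ("lora_down.weight", "lora_up.weight", "alpha")
--
-- def is_state_dict_likely_in_flux_onetrainer_bfl_format(
--     state_dict: dict[str | int, Any],
--     metadata: dict[str, Any] | None = None,
-- ) -> bool:
--     """Checks if the provided state dict is likely in the OneTrainer BFL FLUX LoRA format.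
--
--     This format uses BFL internal key names with 'transformer.' prefix and split QKV projections.
--     """
--     str_keys = [k for k in state_dict.keys() if isinstance(k, str)]
--     if not str_keys:
--         return False
--
--     # All keys must start with 'transformer.'
--     if not all(k.startswith(_TRANSFORMER_PREFIX) for k in str_keys):
--         return False
--
--     # All keys must end with recognized LoRA suffixes.
--     if not all(k.endswith(_LORA_SUFFIXES) for k in str_keys):
--         return False
--
--     # Must have BFL block structure (double_blocks or single_blocks) under transformer prefix.
--     has_bfl_blocks = any(
--         k.startswith("transformer.double_blocks.") or k.startswith("transformer.single_blocks.") for k in str_keys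
--     )
--     if not has_bfl_blocks:
--         return False
--
--     # Must have split QKV pattern (qkv.0, qkv.1, qkv.2) to distinguish from other formats
--     # that might use transformer. prefix in the future.
--     has_split_qkv = any(".qkv.0." in k or ".qkv.1." in k or ".qkv.2." in k or ".linear1.0." in k for k in str_keys)
--     if not has_split_qkv:
--         return False
--
--     return True
-- ===== SOURCE B (Python) =====
-- _TRANSFORMER_PREFIX = "transformer."
-- _LORA_SUFFIXES = ("lora_down.weight", "lora_up.weight", "alpha")
--
--
-- def _classify(k):
--     """Per-key verdict: None if k breaks the format; otherwise a 2-bit code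
--     (bit 0 = BFL double/single block key, bit 1 = split qkv/linear1 key)."""
--     if not k.startswith(_TRANSFORMER_PREFIX):
--         return None
--     if not k.endswith(_LORA_SUFFIXES):
--         return None
--     code = 0
--     if k.startswith("transformer.double_blocks.") or k.startswith("transformer.single_blocks."):
--         code |= 1
--     if ".qkv.0." in k or ".qkv.1." in k or ".qkv.2." in k or ".linear1.0." in k:
--         code |= 2
--     return code
--
--
-- def is_state_dict_likely_in_flux_onetrainer_bfl_format(state_dict, metadata=None):
--     seen = 0
--     found = False
--     for k in state_dict:
--         if not isinstance(k, str):
--             continue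
--         c = _classify(k)
--         if c is None:
--             return False
--         seen |= c
--         found = True
--     return found and seen == 3
-- ===== Notes on version B (the rewrite author's own statement) =====
-- stated objective: alternative
-- what changed: Replaced A's five staged all()/any() passes over the key list by a per-key classifier that returns None (invalid) or a 2-bit code (BFL-block bit, split-qkv bit) and one fail-fast pass OR-ing the codes into a bitmask, returning found and seen == 3.
import Mathlib
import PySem

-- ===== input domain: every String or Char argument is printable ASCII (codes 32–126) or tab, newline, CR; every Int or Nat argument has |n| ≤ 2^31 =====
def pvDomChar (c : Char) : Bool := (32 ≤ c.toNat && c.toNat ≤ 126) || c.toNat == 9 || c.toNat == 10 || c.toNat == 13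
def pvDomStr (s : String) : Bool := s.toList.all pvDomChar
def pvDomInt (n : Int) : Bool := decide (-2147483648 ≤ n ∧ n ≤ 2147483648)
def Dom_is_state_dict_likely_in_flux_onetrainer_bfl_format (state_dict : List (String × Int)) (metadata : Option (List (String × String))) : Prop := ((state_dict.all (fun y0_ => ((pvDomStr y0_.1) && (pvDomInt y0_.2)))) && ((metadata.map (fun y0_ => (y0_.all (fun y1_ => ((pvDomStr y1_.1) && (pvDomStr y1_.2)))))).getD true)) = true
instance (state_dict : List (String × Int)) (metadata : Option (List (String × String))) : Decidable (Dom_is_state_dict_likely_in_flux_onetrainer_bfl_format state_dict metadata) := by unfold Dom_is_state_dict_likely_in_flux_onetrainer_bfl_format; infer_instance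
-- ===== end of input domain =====

-- ===== PORT A =====
-- B replaces A's five staged all()/any() passes by a per-key Optional bitmask classifier
-- and one fail-fast OR-accumulating pass (objective: alternative decomposition; same cost).
def pvStart (k : String) : Bool := PySem.Str.startswith k "transformer."
def pvEnd (k : String) : Bool :=
  PySem.Str.endswith k "lora_down.weight" || PySem.Str.endswith k "lora_up.weight" || PySem.Str.endswith k "alpha"
def pvBfl (k : String) : Bool :=
  PySem.Str.startswith k "transformer.double_blocks." || PySem.Str.startswith k "transformer.single_blocks."
def pvSplit (k : String) : Bool :=
  PySem.Str.isIn ".qkv.0." k || PySem.Str.isIn ".qkv.1." k || PySem.Str.isIn ".qkv.2." k || PySem.Str.isIn ".linear1.0." k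

def is_state_dict_likely_in_flux_onetrainer_bfl_format (state_dict : List (String × Int)) (metadata : Option (List (String × String))) : Bool :=
  -- str_keys = [k for k in state_dict.keys() if isinstance(k, str)]  (all keys are str under the type convention)
  let str_keys := state_dict.map (·.1)
  if str_keys = [] then false
  else if !(str_keys.all pvStart) then false
  else if !(str_keys.all pvEnd) then false
  else if !(str_keys.any pvBfl) then false
  else if !(str_keys.any pvSplit) then false
  else true

-- ===== PORT B =====
-- _classify(k): None if k breaks the format, else code with bit0 = BFL block, bit1 = split qkv
def pvClassify (k : String) : Option Int :=
  if !pvStart k then none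
  else if !pvEnd k then none
  else
    let code : Int := 0
    let code := if pvBfl k then PySem.Int.bor code 1 else code
    let code := if pvSplit k then PySem.Int.bor code 2 else code
    some code

-- the for-loop of B: early 'return False' on an invalid key, else OR the code into seen
def pvScan : List (String × Int) → Int → Bool → Bool
  | [], seen, found => found && (seen == 3)
  | p :: rest, seen, found =>
    match pvClassify p.1 with
    | none => false
    | some c => pvScan rest (PySem.Int.bor seen c) true

def is_state_dict_likely_in_flux_onetrainer_bfl_format_alt (state_dict : List (String × Int)) (metadata : Option (List (String × String))) : Bool :=
  pvScan state_dict 0 false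

-- ===== PRECONDITION & SPEC =====
def Spec_is_state_dict_likely_in_flux_onetrainer_bfl_format (state_dict : List (String × Int)) (metadata : Option (List (String × String))) (out : Bool) : Prop := out = is_state_dict_likely_in_flux_onetrainer_bfl_format_alt state_dict metadata
instance (state_dict : List (String × Int)) (metadata : Option (List (String × String))) (out : Bool) : Decidable (Spec_is_state_dict_likely_in_flux_onetrainer_bfl_format state_dict metadata out) := by unfold Spec_is_state_dict_likely_in_flux_onetrainer_bfl_format; infer_instance

-- ===== CLAIM (what is proved, stated in full; the proofs are below) =====
def Claim_equal_is_state_dict_likely_in_flux_onetrainer_bfl_format : Prop := ∀ (state_dict : List (String × Int)) (metadata : Option (List (String × String))), Dom_is_state_dict_likely_in_flux_onetrainer_bfl_format state_dict metadata → Spec_is_state_dict_likely_in_flux_onetrainer_bfl_format state_dict metadata (is_state_dict_likely_in_flux_onetrainer_bfl_format state_dict metadata)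

-- ===== LEMMAS AND PROOFS =====
def pvCode (a b : Bool) : Int := (if a then 1 else 0) + (if b then 2 else 0)

lemma pvClassify_eq (k : String) :
    pvClassify k = if pvStart k && pvEnd k then some (pvCode (pvBfl k) (pvSplit k)) else none := by
  unfold pvClassify pvCode
  rcases h1 : pvStart k <;> rcases h2 : pvEnd k <;>
    rcases h3 : pvBfl k <;> rcases h4 : pvSplit k <;> simp <;> decide

lemma pvBor_code (a b c d : Bool) :
    PySem.Int.bor (pvCode a b) (pvCode c d) = pvCode (a || c) (b || d) := by
  rcases a <;> rcases b <;> rcases c <;> rcases d <;> decide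

lemma pvCode_eq_three (a b : Bool) : (pvCode a b == 3) = (a && b) := by
  rcases a <;> rcases b <;> decide

lemma pvScan_eq (l : List (String × Int)) (a b : Bool) (found : Bool) :
    pvScan l (pvCode a b) found =
      (l.all (fun p => pvStart p.1 && pvEnd p.1) &&
        (found || !l.isEmpty) &&
        ((a || l.any (fun p => pvBfl p.1)) && (b || l.any (fun p => pvSplit p.1)))) := by
  induction l generalizing a b found with
  | nil => simp [pvScan, pvCode_eq_three]
  | cons x xs ih =>
    simp only [pvScan, pvClassify_eq]
    rcases h : pvStart x.1 && pvEnd x.1 <;>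
      simp [h, pvBor_code, ih, Bool.or_assoc]

lemma pv_all_and (l : List (String × Int)) :
    l.all (fun p => pvStart p.1 && pvEnd p.1) =
      (l.all (fun p => pvStart p.1) && l.all (fun p => pvEnd p.1)) := by
  induction l with
  | nil => rfl
  | cons x xs ih =>
    simp only [List.all_cons, ih, Bool.and_assoc, Bool.and_left_comm]

theorem is_state_dict_likely_in_flux_onetrainer_bfl_format_spec : Claim_equal_is_state_dict_likely_in_flux_onetrainer_bfl_format := by
  intro sd md _
  show _ = _
  unfold is_state_dict_likely_in_flux_onetrainer_bfl_format
    is_state_dict_likely_in_flux_onetrainer_bfl_format_alt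
  have h0 : (0 : Int) = pvCode false false := by decide
  rw [h0, pvScan_eq, pv_all_and]
  rcases sd with _ | ⟨x, xs⟩
  · simp
  · simp only [List.map_eq_nil_iff, List.all_map, List.any_map, Function.comp_def,
      reduceCtorEq, if_false, List.isEmpty_cons, Bool.false_or, Bool.not_false, Bool.and_true]
    rcases h1 : (x :: xs).all (fun p => pvStart p.1) <;>
    rcases h2 : (x :: xs).all (fun p => pvEnd p.1) <;>
    rcases h3 : (x :: xs).any (fun p => pvBfl p.1) <;>
    rcases h4 : (x :: xs).any (fun p => pvSplit p.1) <;>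
      simp [h1, h2, h3, h4]
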